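-- pv_equiv track=rewrite | github.com/DeadAt0m/DCA-PyTorch | src/dcapytorch/tests/test_dca.py | get_cells_bundles
-- ===== SOURCE A (Python) =====
-- def get_cells_bundles(cell_compatibilities):
--     cells_bundles = []
--     tmp = []
--     prev = 2
--     for i, cell in enumerate(cell_compatibilities):
--         if cell == 1:
--             tmp.append(i)
--             prev = cell
--         else:
--             tmp.append(i)
--             if prev != cell:
--                 prev = cell
--             cells_bundles.append(tmp)
--             tmp = []
--     return cells_bundles, tmp
-- ===== SOURCE B (Python) =====
-- def get_cells_bundles(cell_compatibilities):
--     breaks = [i for i, c in enumerate(cell_compatibilities) if c != 1]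
--     cells_bundles = []
--     start = 0
--     for b in breaks:
--         cells_bundles.append(list(range(start, b + 1)))
--         start = b + 1
--     tmp = list(range(start, len(cell_compatibilities)))
--     return cells_bundles, tmp
-- ===== Notes on version B (the rewrite author's own statement) =====
-- stated objective: alternative
-- what changed: Replaces A's stateful per-element accumulate-and-flush loop (with a prev tracker) by first collecting the break positions (c != 1) in one pass and then materialising each bundle as a contiguous range between split points.
import Mathlib
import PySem

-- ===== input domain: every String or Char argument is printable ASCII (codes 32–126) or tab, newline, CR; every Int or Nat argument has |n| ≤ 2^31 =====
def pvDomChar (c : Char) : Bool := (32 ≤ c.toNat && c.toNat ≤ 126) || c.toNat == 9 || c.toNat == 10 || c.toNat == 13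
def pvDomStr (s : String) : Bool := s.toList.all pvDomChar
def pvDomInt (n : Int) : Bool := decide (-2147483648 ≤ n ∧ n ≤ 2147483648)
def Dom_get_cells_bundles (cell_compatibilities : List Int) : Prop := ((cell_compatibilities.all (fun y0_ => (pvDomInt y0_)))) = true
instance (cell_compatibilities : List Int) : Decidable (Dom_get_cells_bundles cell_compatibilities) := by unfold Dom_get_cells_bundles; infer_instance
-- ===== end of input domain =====

-- B replaces A's stateful accumulate-and-flush loop by collecting break positions and materialising range bundles (alternative decomposition, same cost).

-- ===== PORT A =====
-- A: one stateful loop, appending each index to tmp and flushing tmp into cells_bundles when cell != 1 (prev tracked but never read for output).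
def get_cells_bundles (cell_compatibilities : List Int) : List (List Int) × List Int :=
  let st := (PySem.List.enumerate cell_compatibilities 0).foldl
    (fun (acc : List (List Int) × List Int × Int) (p : Int × Int) =>
      if p.2 = 1 then (acc.1, acc.2.1 ++ [p.1], p.2)
      else (acc.1 ++ [acc.2.1 ++ [p.1]], ([] : List Int),
            if acc.2.2 ≠ p.2 then p.2 else acc.2.2))
    ([], [], 2)
  (st.1, st.2.1)

-- ===== PORT B =====
-- B: break positions first, then each bundle is list(range(start, b+1)) between successive breaks.
def get_cells_bundles_alt (cell_compatibilities : List Int) : List (List Int) × List Int :=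
  let breaks := (PySem.List.enumerate cell_compatibilities 0).filterMap
    (fun p => if p.2 ≠ 1 then some p.1 else none)
  let st := breaks.foldl
    (fun (acc : List (List Int) × Int) (b : Int) =>
      (acc.1 ++ [PySem.List.pyRange acc.2 (b + 1) 1], b + 1)) ([], 0)
  (st.1, PySem.List.pyRange st.2 (cell_compatibilities.length : Int) 1)

-- ===== PRECONDITION & SPEC =====
def Spec_get_cells_bundles (cell_compatibilities : List Int) (out : List (List Int) × List Int) : Prop := out = get_cells_bundles_alt cell_compatibilities
instance (cell_compatibilities : List Int) (out : List (List Int) × List Int) : Decidable (Spec_get_cells_bundles cell_compatibilities out) := by unfold Spec_get_cells_bundles; infer_instance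

-- ===== CLAIM (what is proved, stated in full; the proofs are below) =====
def Claim_equal_get_cells_bundles : Prop := ∀ (cell_compatibilities : List Int), Dom_get_cells_bundles cell_compatibilities → Spec_get_cells_bundles cell_compatibilities (get_cells_bundles cell_compatibilities)

-- ===== LEMMAS AND PROOFS =====

-- Common characterisation of both programs: bundles of contiguous index ranges,
-- current index i, current segment starting at `start`.
def pvSpec (start i : Int) : List Int → List (List Int) × List Int
  | [] => ([], PySem.List.pyRange start i 1)
  | c :: rest =>
    if c = 1 then pvSpec start (i + 1) rest
    else ((PySem.List.pyRange start (i + 1) 1) :: (pvSpec (i + 1) (i + 1) rest).1,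
          (pvSpec (i + 1) (i + 1) rest).2)

lemma foldA_spec (cs : List Int) : ∀ (i start : Int) (B : List (List Int)) (p : Int),
    start ≤ i →
    (let st := (PySem.List.enumerate cs i).foldl
        (fun (acc : List (List Int) × List Int × Int) (q : Int × Int) =>
          if q.2 = 1 then (acc.1, acc.2.1 ++ [q.1], q.2)
          else (acc.1 ++ [acc.2.1 ++ [q.1]], ([] : List Int),
                if acc.2.2 ≠ q.2 then q.2 else acc.2.2))
        (B, PySem.List.pyRange start i 1, p)
     (st.1, st.2.1))
    = (B ++ (pvSpec start i cs).1, (pvSpec start i cs).2) := by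
  induction cs with
  | nil => intro i start B p h; simp [PySem.List.enumerate_nil, pvSpec]
  | cons c rest ih =>
    intro i start B p h
    rw [PySem.List.enumerate_cons]
    by_cases hc : c = 1
    · simp only [List.foldl_cons, hc, if_true]
      rw [← PySem.List.pyRange_one_succ_right h]
      have := ih (i + 1) start B 1 (by omega)
      simpa [pvSpec, hc] using this
    · simp only [List.foldl_cons, if_neg hc]
      rw [← PySem.List.pyRange_one_succ_right h]
      have := ih (i + 1) (i + 1)
        (B ++ [PySem.List.pyRange start (i + 1) 1])
        (if p ≠ c then c else p) le_rfl
      rw [PySem.List.pyRange_one_eq_nil (le_refl (i + 1))] at this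
      simp only [Prod.mk.injEq] at this
      obtain ⟨h1, h2⟩ := this
      simp only [pvSpec, if_neg hc, Prod.mk.injEq]
      constructor
      · rw [h1]; simp
      · exact h2

lemma foldB_spec (cs : List Int) : ∀ (i s : Int) (B : List (List Int)),
    (let st := ((PySem.List.enumerate cs i).filterMap
        (fun p => if p.2 ≠ 1 then some p.1 else none)).foldl
      (fun (acc : List (List Int) × Int) (b : Int) =>
        (acc.1 ++ [PySem.List.pyRange acc.2 (b + 1) 1], b + 1)) (B, s)
     (st.1, PySem.List.pyRange st.2 (i + (cs.length : Int)) 1))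
    = (B ++ (pvSpec s i cs).1, (pvSpec s i cs).2) := by
  induction cs with
  | nil => intro i s B; simp [PySem.List.enumerate_nil, pvSpec]
  | cons c rest ih =>
    intro i s B
    rw [PySem.List.enumerate_cons]
    by_cases hc : c = 1
    · simp only [List.filterMap_cons, hc]
      have := ih (i + 1) s B
      simp only [pvSpec, reduceIte]
      simpa [add_assoc, add_comm, add_left_comm] using this
    · simp only [List.filterMap_cons, if_pos hc]
      have := ih (i + 1) (i + 1) (B ++ [PySem.List.pyRange s (i + 1) 1])
      simp only [Prod.mk.injEq] at this
      obtain ⟨h1, h2⟩ := this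
      simp only [List.foldl_cons, pvSpec, if_neg hc, Prod.mk.injEq]
      constructor
      · rw [h1]; simp
      · rw [← h2]
        congr 1
        simp only [List.length_cons]
        push_cast
        ring

-- ===== VERDICT (by name: the statement is the Claim_ definition above) =====
theorem get_cells_bundles_spec : Claim_equal_get_cells_bundles := by
  intro cs _
  unfold Spec_get_cells_bundles get_cells_bundles get_cells_bundles_alt
  have hA := foldA_spec cs 0 0 [] 2 le_rfl
  have hB := foldB_spec cs 0 0 []
  rw [show PySem.List.pyRange 0 0 1 = ([] : List Int) from
    PySem.List.pyRange_one_eq_nil le_rfl] at hA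
  simp only [zero_add, Prod.mk.injEq] at hA hB
  obtain ⟨hA1, hA2⟩ := hA
  obtain ⟨hB1, hB2⟩ := hB
  refine Prod.ext ?_ ?_
  · simpa using hA1.trans hB1.symm
  · simpa using hA2.trans hB2.symm
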